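-- pv_equiv track=rewrite | github.com/pypi-data/pypi-mirror-404 | packages/tokenette/tokenette-2.0.0-py3-none-any.whl/tokenette/tools/git_ops.py | _compress_diff
-- ===== SOURCE A (Python) =====
-- def _compress_diff(diff: str) -> str:
--     """Compress diff by removing redundant information."""
--     if not diff:
--         return ""
--
--     lines = diff.split("\n")
--     compressed = []
--     skip_next_header = False
--
--     for line in lines:
--         # Skip redundant diff headers
--         if line.startswith("diff --git"):
--             # Keep just the file path
--             parts = line.split(" b/")
--             if len(parts) > 1:
--                 compressed.append(f"=== {parts[1]} ===")
--             skip_next_header = True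
--             continue
--
--         if skip_next_header:
--             if line.startswith("index ") or line.startswith("---") or line.startswith("+++"):
--                 continue
--             skip_next_header = False
--
--         # Keep actual changes
--         if line.startswith("@@") or line.startswith("+") or line.startswith("-") or line.strip():
--             compressed.append(line)
--
--     return "\n".join(compressed)
-- ===== SOURCE B (Python) =====
-- def _keep(line):
--     return line.startswith(("@@", "+", "-")) or bool(line.strip())
--
--
-- def _split_at_headers(lines):
--     """Partition lines into the preamble (before any 'diff --git') and one
--     chunk per file, each chunk starting with its 'diff --git' header line."""
--     pre, chunks, cur = [], [], None
--     for line in lines: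
--         if line.startswith("diff --git"):
--             if cur is not None:
--                 chunks.append(cur)
--             cur = [line]
--         elif cur is None:
--             pre.append(line)
--         else:
--             cur.append(line)
--     if cur is not None:
--         chunks.append(cur)
--     return pre, chunks
--
--
-- def _compress_diff(diff: str) -> str:
--     pre, chunks = _split_at_headers(diff.split("\n"))
--     out = [line for line in pre if _keep(line)]
--     for chunk in chunks:
--         parts = chunk[0].split(" b/")
--         if len(parts) > 1:
--             out.append("=== " + parts[1] + " ===")
--         body = chunk[1:]
--         k = 0
--         while k < len(body) and body[k].startswith(("index ", "---", "+++")):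
--             k += 1
--         out.extend(line for line in body[k:] if _keep(line))
--     return "\n".join(out)
-- ===== Notes on version B (the rewrite author's own statement) =====
-- stated objective: alternative
-- what changed: B replaces A's single-pass loop with a skip-next-header boolean by first partitioning the split lines into a preamble plus one chunk per file-header line, then processing each chunk independently: emit the file path, drop the leading run of redundant header lines, keep-filter the rest.
import Mathlib
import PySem

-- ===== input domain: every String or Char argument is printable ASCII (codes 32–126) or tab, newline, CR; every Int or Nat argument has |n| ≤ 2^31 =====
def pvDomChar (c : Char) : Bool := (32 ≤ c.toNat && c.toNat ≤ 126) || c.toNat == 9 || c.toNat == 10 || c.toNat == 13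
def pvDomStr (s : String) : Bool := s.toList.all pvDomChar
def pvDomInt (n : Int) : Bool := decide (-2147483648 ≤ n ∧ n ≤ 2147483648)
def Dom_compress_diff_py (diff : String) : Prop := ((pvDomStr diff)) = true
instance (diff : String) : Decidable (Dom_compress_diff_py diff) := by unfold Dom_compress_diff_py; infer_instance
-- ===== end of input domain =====

-- B replaces A's single-pass boolean state machine with a partition into preamble + per-file
-- chunks processed independently (alternative decomposition, same linear cost).

-- ===== PORT A =====
-- loop body of A's for-loop: state = (compressed, skip_next_header)
def pvAstep (st : List String × Bool) (line : String) : List String × Bool :=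
  if PySem.Str.startswith line "diff --git" then
    match ((PySem.Str.split? line " b/").getD []) with
    | _ :: p :: _ => (st.1 ++ ["=== " ++ p ++ " ==="], true)   -- len(parts) > 1
    | _ => (st.1, true)
  else if st.2 && (PySem.Str.startswith line "index " || PySem.Str.startswith line "---"
      || PySem.Str.startswith line "+++") then
    (st.1, st.2)
  else if PySem.Str.startswith line "@@" || PySem.Str.startswith line "+"
      || PySem.Str.startswith line "-" || (PySem.Str.strip line != "") then
    (st.1 ++ [line], false)
  else
    (st.1, false)

def compress_diff_py (diff : String) : String :=
  if diff == "" then ""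
  else
    let lines := ((PySem.Str.split? diff "
").getD [])
    let res := lines.foldl pvAstep ([], false)
    PySem.Str.join "
" res.1

-- ===== PORT B =====
-- _keep
def pvKeep (line : String) : Bool :=
  PySem.Str.startswith line "@@" || PySem.Str.startswith line "+"
    || PySem.Str.startswith line "-" || (PySem.Str.strip line != "")

-- startswith(("index ", "---", "+++"))
def pvHdrish (line : String) : Bool :=
  PySem.Str.startswith line "index " || PySem.Str.startswith line "---"
    || PySem.Str.startswith line "+++"

-- loop body of _split_at_headers: state = (pre, chunks, cur)
def pvBstep (st : List String × List (List String) × Option (List String)) (line : String) :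
    List String × List (List String) × Option (List String) :=
  if PySem.Str.startswith line "diff --git" then
    (st.1, (match st.2.2 with | some c => st.2.1 ++ [c] | none => st.2.1), some [line])
  else
    match st.2.2 with
    | none => (st.1 ++ [line], st.2.1, none)
    | some c => (st.1, st.2.1, some (c ++ [line]))

def pvSplitAtHeaders (lines : List String) : List String × List (List String) :=
  let st := lines.foldl pvBstep ([], [], none)
  (st.1, st.2.1 ++ (match st.2.2 with | some c => [c] | none => []))

-- per-chunk processing: header emit, drop the leading index/---/+++ run, keep-filter the rest
def pvProcChunk (chunk : List String) : List String :=
  (match ((PySem.Str.split? (chunk.headD "") " b/").getD []) with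
   | _ :: p :: _ => ["=== " ++ p ++ " ==="]
   | _ => []) ++
  (((chunk.drop 1).dropWhile pvHdrish).filter pvKeep)

def compress_diff_py_alt (diff : String) : String :=
  let pc := pvSplitAtHeaders (((PySem.Str.split? diff "
").getD []))
  PySem.Str.join "
" (pc.1.filter pvKeep ++ pc.2.flatMap pvProcChunk)

-- ===== PRECONDITION & SPEC =====
def Spec_compress_diff_py (diff : String) (out : String) : Prop := out = compress_diff_py_alt diff
instance (diff : String) (out : String) : Decidable (Spec_compress_diff_py diff out) := by unfold Spec_compress_diff_py; infer_instance

-- ===== CLAIM (what is proved, stated in full; the proofs are below) =====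
def Claim_equal_compress_diff_py : Prop := ∀ (diff : String), Dom_compress_diff_py diff → Spec_compress_diff_py diff (compress_diff_py diff)

-- ===== LEMMAS AND PROOFS =====

-- header-line emission, shared characterisation
def pvHout (line : String) : List String :=
  match ((PySem.Str.split? line " b/").getD []) with
  | _ :: p :: _ => ["=== " ++ p ++ " ==="]
  | _ => []

-- recursive characterisation of A's loop (output lines, given the skip flag)
def pvR : List String → Bool → List String
  | [], _ => []
  | l :: ls, skip =>
    if PySem.Str.startswith l "diff --git" then pvHout l ++ pvR ls true
    else if skip && pvHdrish l then pvR ls true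
    else (if pvKeep l then [l] else []) ++ pvR ls false

theorem lemA (ls : List String) : ∀ (acc : List String) (skip : Bool),
    (List.foldl pvAstep (acc, skip) ls).1 = acc ++ pvR ls skip := by
  induction ls with
  | nil => intro acc skip; simp [pvR]
  | cons l ls ih =>
    intro acc skip
    rw [List.foldl_cons]
    by_cases h1 : PySem.Str.startswith l "diff --git" = true
    · have hstep : pvAstep (acc, skip) l = (acc ++ pvHout l, true) := by
        unfold pvAstep pvHout
        rw [if_pos h1]
        cases (PySem.Str.split? l " b/").getD [] with
        | nil => simp
        | cons x xs => cases xs with | nil => simp | cons p r => simp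
      rw [hstep, ih]
      simp only [pvR]
      rw [if_pos h1, List.append_assoc]
    · by_cases h2 : (skip && (PySem.Str.startswith l "index " || PySem.Str.startswith l "---"
          || PySem.Str.startswith l "+++")) = true
      · have hs : skip = true := by
          cases skip
          · simp at h2
          · rfl
        have hstep : pvAstep (acc, skip) l = (acc, skip) := by
          unfold pvAstep
          rw [if_neg h1, if_pos h2]
        rw [hstep, ih]
        simp only [pvR]
        rw [if_neg h1, if_pos (show (skip && pvHdrish l) = true from h2), hs]
      · have hstep : pvAstep (acc, skip) l = (acc ++ (if pvKeep l then [l] else []), false) := by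
          unfold pvAstep pvKeep
          rw [if_neg h1, if_neg h2]
          split_ifs <;> simp
        rw [hstep, ih]
        simp only [pvR]
        rw [if_neg h1, if_neg (show ¬ (skip && pvHdrish l) = true from h2), List.append_assoc]

-- output read off a B-loop state
def pvOut (st : List String × List (List String) × Option (List String)) : List String :=
  st.1.filter pvKeep ++
    (st.2.1 ++ (match st.2.2 with | some c => [c] | none => [])).flatMap pvProcChunk

-- recursive characterisation of B's loop once inside a chunk (seg = current chunk so far)
def pvF : List String → List String → List String
  | [], seg => pvProcChunk seg
  | l :: ls, seg =>
    if PySem.Str.startswith l "diff --git" then pvProcChunk seg ++ pvF ls [l]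
    else pvF ls (seg ++ [l])

theorem procChunk_cons (h : String) (b : List String) :
    pvProcChunk (h :: b) = pvHout h ++ ((b.dropWhile pvHdrish).filter pvKeep) := rfl

theorem lemG1 (ls : List String) : ∀ (pre : List String) (chunks : List (List String)) (seg : List String),
    pvOut (List.foldl pvBstep (pre, chunks, some seg) ls)
      = pre.filter pvKeep ++ chunks.flatMap pvProcChunk ++ pvF ls seg := by
  induction ls with
  | nil =>
    intro pre chunks seg
    simp [pvOut, pvF, List.append_assoc]
  | cons l ls ih =>
    intro pre chunks seg
    rw [List.foldl_cons]
    by_cases h1 : PySem.Str.startswith l "diff --git" = true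
    · have hstep : pvBstep (pre, chunks, some seg) l = (pre, chunks ++ [seg], some [l]) := by
        unfold pvBstep
        rw [if_pos h1]
      rw [hstep, ih]
      simp only [pvF]
      rw [if_pos h1]
      simp [List.append_assoc]
    · have hstep : pvBstep (pre, chunks, some seg) l = (pre, chunks, some (seg ++ [l])) := by
        unfold pvBstep
        rw [if_neg h1]
      rw [hstep, ih]
      simp only [pvF]
      rw [if_neg h1]

theorem lemK (ls : List String) : ∀ (h : String) (b : List String),
    pvF ls (h :: b) = pvHout h ++ ((b.dropWhile pvHdrish).filter pvKeep)
      ++ pvR ls (b.dropWhile pvHdrish).isEmpty := by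
  induction ls with
  | nil =>
    intro h b
    simp [pvF, procChunk_cons, pvR]
  | cons l ls ih =>
    intro h b
    simp only [pvF]
    by_cases h1 : PySem.Str.startswith l "diff --git" = true
    · rw [if_pos h1, procChunk_cons, ih l []]
      simp only [pvR]
      rw [if_pos h1]
      simp [List.append_assoc, List.dropWhile]
    · rw [if_neg h1, List.cons_append, ih h (b ++ [l]), List.dropWhile_append]
      simp only [pvR]
      rw [if_neg h1]
      by_cases hs : (b.dropWhile pvHdrish).isEmpty = true
      · have hb : b.dropWhile pvHdrish = [] := by simpa [List.isEmpty_iff] using hs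
        by_cases hl : pvHdrish l = true
        · simp [hb, hl, List.dropWhile]
        · cases hk : pvKeep l <;> simp [hb, hl, hk, List.dropWhile]
      · have hs' : (b.dropWhile pvHdrish).isEmpty = false := by
          cases hh : (b.dropWhile pvHdrish).isEmpty
          · rfl
          · exact absurd hh hs
        have hne : (b.dropWhile pvHdrish ++ [l]).isEmpty = false := by
          simp
        cases hk : pvKeep l <;>
          simp [hs', hne, List.filter_append, List.filter, hk, List.append_assoc]

theorem lemG0 (ls : List String) : ∀ (pre : List String),
    pvOut (List.foldl pvBstep (pre, [], none) ls) = pre.filter pvKeep ++ pvR ls false := by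
  induction ls with
  | nil => intro pre; simp [pvOut, pvR]
  | cons l ls ih =>
    intro pre
    rw [List.foldl_cons]
    by_cases h1 : PySem.Str.startswith l "diff --git" = true
    · have hstep : pvBstep (pre, [], none) l = (pre, [], some [l]) := by
        unfold pvBstep
        rw [if_pos h1]
      rw [hstep, lemG1, lemK ls l []]
      simp only [pvR]
      rw [if_pos h1]
      simp [List.dropWhile]
    · have hstep : pvBstep (pre, [], none) l = (pre ++ [l], [], none) := by
        unfold pvBstep
        rw [if_neg h1]
      rw [hstep, ih]
      simp only [pvR]
      rw [if_neg h1]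
      simp only [Bool.false_and, Bool.false_eq_true, if_false, List.filter_append, List.filter,
        List.append_assoc]
      cases hk : pvKeep l <;> simp

theorem alt_eq (diff : String) :
    compress_diff_py_alt diff
      = PySem.Str.join "\n" (pvOut (List.foldl pvBstep ([], [], none)
          ((PySem.Str.split? diff "\n").getD []))) := rfl

-- ===== VERDICT (by name: the statement is the Claim_ definition above) =====
theorem compress_diff_py_spec : Claim_equal_compress_diff_py := by
  intro diff _
  unfold Spec_compress_diff_py
  by_cases he : diff = ""
  · subst he
    decide
  · unfold compress_diff_py
    rw [if_neg (by simpa using he)]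
    show PySem.Str.join "\n"
        (List.foldl pvAstep ([], false) ((PySem.Str.split? diff "\n").getD [])).1
      = compress_diff_py_alt diff
    rw [lemA, alt_eq, lemG0]
    simp
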